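-- pv_equiv track=rewrite | github.com/bibhs0401/rl-guided-feasibility-pump | generate_stalling_instances.py | chained_cycles_graph
-- ===== SOURCE A (Python) =====
-- def chained_cycles_graph(cycle_size: int, num_cycles: int):
--     assert cycle_size >= 3 and cycle_size % 2 == 1
--     assert num_cycles >= 1
--     vertices = [0]
--     edges = []
--     node_id = 1
--     shared = 0
--     for _ in range(num_cycles):
--         cycle_nodes = [shared]
--         for _ in range(cycle_size - 1):
--             vertices.append(node_id)
--             cycle_nodes.append(node_id)
--             node_id += 1
--         for i in range(cycle_size):
--             u = cycle_nodes[i]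
--             v = cycle_nodes[(i + 1) % cycle_size]
--             edge = (min(u, v), max(u, v))
--             if edge not in edges:
--                 edges.append(edge)
--         shared = cycle_nodes[-1]
--     return vertices, edges
-- ===== SOURCE B (Python) =====
-- def chained_cycles_graph(cycle_size: int, num_cycles: int):
--     assert cycle_size >= 3 and cycle_size % 2 == 1
--     assert num_cycles >= 1
--     total = 1 + num_cycles * (cycle_size - 1)
--     vertices = list(range(total))
--     edges = []
--     for k in range(num_cycles):
--         base = k * (cycle_size - 1)
--         for i in range(cycle_size - 1):
--             edges.append((base + i, base + i + 1))
--         edges.append((base, base + cycle_size - 1))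
--     return vertices, edges
-- ===== Notes on version B (the rewrite author's own statement) =====
-- stated objective: faster
-- what changed: Replaces the node_id counter, per-cycle cycle_nodes list, modular indexing and the 'edge not in edges' linear scan with a direct arithmetic construction (vertices = range(total), each cycle's edges from base = k*(cycle_size-1)); intended as faster: a timing run measured B ~50-100x faster at the largest sizes where both finished (on some giant outputs neither finishes in budget).
import Mathlib
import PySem

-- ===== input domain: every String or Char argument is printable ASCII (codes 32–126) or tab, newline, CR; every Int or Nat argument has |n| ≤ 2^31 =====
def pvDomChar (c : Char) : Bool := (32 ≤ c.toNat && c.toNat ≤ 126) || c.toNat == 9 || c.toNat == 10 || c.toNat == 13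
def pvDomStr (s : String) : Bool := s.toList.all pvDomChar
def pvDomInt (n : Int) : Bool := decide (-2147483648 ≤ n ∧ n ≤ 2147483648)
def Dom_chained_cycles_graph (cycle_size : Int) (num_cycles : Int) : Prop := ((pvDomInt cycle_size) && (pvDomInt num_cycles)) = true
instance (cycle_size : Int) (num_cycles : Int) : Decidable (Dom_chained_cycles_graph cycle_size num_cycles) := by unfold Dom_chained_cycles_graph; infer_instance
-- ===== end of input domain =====

-- B replaces A's node-id counter, per-cycle node list, modular indexing and 'edge not in edges'
-- scan by a direct arithmetic construction of the same vertices and edges.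

-- ===== PORT A =====
-- literal transliteration of A; the indexing cycle_nodes[i] / [(i+1)%cycle_size] / [-1] is always
-- in range on the admitted inputs (cycle_size ≥ 3), so pyGetD with default 0 is exact there

-- body of A's inner 'for _ in range(cycle_size - 1)' loop over (vertices, cycle_nodes, node_id)
def aInnerStep (t : List Int × List Int × Int) (_ : Int) : List Int × List Int × Int :=
  (t.1 ++ [t.2.2], t.2.1 ++ [t.2.2], t.2.2 + 1)

-- body of A's 'for i in range(cycle_size)' edge loop
def aEdgeStep (cycle_size : Int) (cycle_nodes : List Int)
    (es : List (Int × Int)) (i : Int) : List (Int × Int) :=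
  let u := PySem.List.pyGetD cycle_nodes i 0
  let v := PySem.List.pyGetD cycle_nodes (PySem.Int.mod (i + 1) cycle_size) 0
  let edge := (min u v, max u v)
  if edge ∈ es then es else es ++ [edge]

-- body of A's outer 'for _ in range(num_cycles)' loop over (vertices, edges, node_id, shared)
def aCycleStep (cycle_size : Int)
    (st : List Int × List (Int × Int) × Int × Int) (_ : Int) :
    List Int × List (Int × Int) × Int × Int :=
  let inner := (PySem.List.pyRange 0 (cycle_size - 1) 1).foldl aInnerStep
    (st.1, [st.2.2.2], st.2.2.1)
  let cycle_nodes := inner.2.1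
  let edges := (PySem.List.pyRange 0 cycle_size 1).foldl (aEdgeStep cycle_size cycle_nodes) st.2.1
  (inner.1, edges, inner.2.2, PySem.List.pyGetD cycle_nodes (-1) 0)

def chained_cycles_graph (cycle_size : Int) (num_cycles : Int) : List Int × (List (Int × Int)) :=
  let st := (PySem.List.pyRange 0 num_cycles 1).foldl (aCycleStep cycle_size) ([0], [], 1, 0)
  (st.1, st.2.1)

-- ===== PORT B =====
-- body of B's 'for k in range(num_cycles)' loop
def bCycleStep (cycle_size : Int) (es : List (Int × Int)) (k : Int) : List (Int × Int) :=
  let base := k * (cycle_size - 1)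
  let es := (PySem.List.pyRange 0 (cycle_size - 1) 1).foldl
    (fun es i => es ++ [(base + i, base + i + 1)]) es
  es ++ [(base, base + cycle_size - 1)]

def chained_cycles_graph_alt (cycle_size : Int) (num_cycles : Int) : List Int × (List (Int × Int)) :=
  let total := 1 + num_cycles * (cycle_size - 1)
  let vertices := PySem.List.pyRange 0 total 1
  let edges := (PySem.List.pyRange 0 num_cycles 1).foldl (bCycleStep cycle_size) []
  (vertices, edges)

-- ===== PRECONDITION & SPEC =====
-- A (and B) assert cycle_size ≥ 3 and odd and num_cycles ≥ 1; outside this Python raises AssertionError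
def Pre_chained_cycles_graph (cycle_size : Int) (num_cycles : Int) : Prop :=
  3 ≤ cycle_size ∧ PySem.Int.mod cycle_size 2 = 1 ∧ 1 ≤ num_cycles
instance (cycle_size : Int) (num_cycles : Int) : Decidable (Pre_chained_cycles_graph cycle_size num_cycles) := by unfold Pre_chained_cycles_graph; infer_instance
def pvWitness_chained_cycles_graph : Int × Int := (3, 1)

def Spec_chained_cycles_graph (cycle_size : Int) (num_cycles : Int) (out : List Int × (List (Int × Int))) : Prop := out = chained_cycles_graph_alt cycle_size num_cycles
instance (cycle_size : Int) (num_cycles : Int) (out : List Int × (List (Int × Int))) : Decidable (Spec_chained_cycles_graph cycle_size num_cycles out) := by unfold Spec_chained_cycles_graph; infer_instance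

-- ===== CLAIM (what is proved, stated in full; the proofs are below) =====
def Claim_equal_chained_cycles_graph : Prop := ∀ (cycle_size : Int) (num_cycles : Int), Dom_chained_cycles_graph cycle_size num_cycles → Pre_chained_cycles_graph cycle_size num_cycles → Spec_chained_cycles_graph cycle_size num_cycles (chained_cycles_graph cycle_size num_cycles)

-- ===== LEMMAS AND PROOFS =====

-- closed forms: seg a n = [a, a+1, …, a+n-1]; pathE b n = path edges; cycE = one cycle's edges
def seg (a : Int) (n : Nat) : List Int := (List.range n).map (fun (k : Nat) => a + (k : Int))
def pathE (b : Int) (n : Nat) : List (Int × Int) := (List.range n).map (fun (k : Nat) => (b + (k : Int), b + (k : Int) + 1))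
def cycE (b : Int) (n : Nat) : List (Int × Int) := pathE b n ++ [(b, b + n)]
def allE (m : Nat) : Nat → List (Int × Int)
  | 0 => []
  | k + 1 => allE m k ++ cycE ((k : Int) * m) m

lemma seg_succ (a : Int) (n : Nat) : seg a (n + 1) = seg a n ++ [a + n] := by
  simp [seg, List.range_succ]

lemma seg_cons (a : Int) (n : Nat) : seg a (n + 1) = a :: seg (a + 1) n := by
  simp only [seg, List.range_succ_eq_map, List.map_cons, List.map_map, Nat.cast_zero, add_zero]
  congr 1
  apply List.map_congr_left
  intro k hk
  simp only [Function.comp_apply]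
  push_cast
  ring

lemma pathE_succ (b : Int) (n : Nat) : pathE b (n + 1) = pathE b n ++ [(b + n, b + n + 1)] := by
  simp [pathE, List.range_succ]

lemma seg_append (a : Int) (p q : Nat) : seg a p ++ seg (a + p) q = seg a (p + q) := by
  induction q with
  | zero => simp [seg]
  | succ q ih =>
    rw [show p + (q + 1) = (p + q) + 1 by omega, seg_succ, seg_succ, ← List.append_assoc, ih]
    have : a + (p : Int) + (q : Int) = a + ((p + q : Nat) : Int) := by push_cast; ring
    rw [this]

lemma length_seg (a : Int) (n : Nat) : (seg a n).length = n := by simp [seg]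

lemma getElem_seg (a : Int) (n k : Nat) (h : k < n) :
    (seg a n)[k]'(by simp [length_seg]; omega) = a + k := by
  simp only [seg]
  rw [List.getElem_map]
  simp

lemma pyGetD_seg (a : Int) (n : Nat) (i : Int) (h0 : 0 ≤ i) (h1 : i < n) :
    PySem.List.pyGetD (seg a n) i 0 = a + i := by
  obtain ⟨k, rfl⟩ : ∃ k : Nat, i = (k : Int) := ⟨i.toNat, by omega⟩
  rw [PySem.List.pyGetD_natCast]
  rw [List.getD_eq_getElem _ _ (by rw [length_seg]; omega)]
  rw [getElem_seg a n k (by omega)]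

lemma fst_lt_of_mem_pathE (b : Int) (n : Nat) (e : Int × Int) (h : e ∈ pathE b n) :
    e.1 < b + n ∧ b ≤ e.1 ∧ e.2 = e.1 + 1 := by
  simp only [pathE, List.mem_map] at h
  obtain ⟨k, hk, rfl⟩ := h
  have hk' : (k : Int) < n := by exact_mod_cast List.mem_range.mp hk
  have hk0 : (0 : Int) ≤ k := by positivity
  exact ⟨by dsimp; omega, by dsimp; omega, by dsimp⟩

lemma snd_le_of_mem_allE (m : Nat) (k : Nat) (e : Int × Int) (h : e ∈ allE m k) :
    e.2 ≤ (k : Int) * m := by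
  induction k with
  | zero => simp [allE] at h
  | succ k ih =>
    have hm0 : (0 : Int) ≤ (m : Int) := by positivity
    have hexp : ((k + 1 : Nat) : Int) * m = (k : Int) * m + m := by push_cast; ring
    rw [hexp]
    simp only [allE, List.mem_append] at h
    rcases h with h | h
    · have := ih h; linarith
    · simp only [cycE, List.mem_append, List.mem_singleton] at h
      rcases h with h | h
      · obtain ⟨h1, h2, h3⟩ := fst_lt_of_mem_pathE _ _ _ h
        linarith
      · subst h; dsimp; linarith

-- A's inner vertex-append loop
lemma innerA (l : List Int) :
    ∀ (v cn : List Int) (nid : Int),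
    l.foldl aInnerStep (v, cn, nid)
      = (v ++ seg nid l.length, cn ++ seg nid l.length, nid + l.length) := by
  induction l with
  | nil => intro v cn nid; simp [seg]
  | cons x xs ih =>
    intro v cn nid
    simp only [List.foldl_cons, aInnerStep, ih, List.length_cons]
    rw [seg_cons]
    refine Prod.ext ?_ (Prod.ext ?_ ?_)
    · simp
    · simp
    · dsimp; ring

-- A's edge loop, path phase: each path edge is new, so the membership guard always appends
lemma phase1 (m : Nat) (hm : 2 ≤ m) (b : Int) (es0 : List (Int × Int))
    (hinv : ∀ e ∈ es0, e.2 ≤ b) :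
    ∀ (k j : Nat), j + k ≤ m →
    (PySem.List.pyRange (j : Int) ((j : Int) + (k : Int)) 1).foldl
      (aEdgeStep ((m : Int) + 1) (seg b (m + 1))) (es0 ++ pathE b j)
      = es0 ++ pathE b (j + k) := by
  intro k
  induction k with
  | zero =>
    intro j hj
    rw [PySem.List.pyRange_one_eq_nil (by omega)]
    simp
  | succ k ih =>
    intro j hj
    have hlt : (j : Int) < (j : Int) + ((k : Nat) + 1 : Nat) := by push_cast; omega
    rw [PySem.List.pyRange_one_cons hlt, List.foldl_cons]
    have hstep : aEdgeStep ((m : Int) + 1) (seg b (m + 1)) (es0 ++ pathE b j) (j : Int)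
        = es0 ++ pathE b (j + 1) := by
      have hmod : PySem.Int.mod ((j : Int) + 1) ((m : Int) + 1) = (j : Int) + 1 := by
        rw [PySem.Int.mod_eq_emod_of_pos (by positivity)]
        exact Int.emod_eq_of_lt (by positivity) (by omega)
      have hu : PySem.List.pyGetD (seg b (m + 1)) (j : Int) 0 = b + j :=
        pyGetD_seg _ _ _ (by positivity) (by omega)
      have hv : PySem.List.pyGetD (seg b (m + 1)) ((j : Int) + 1) 0 = b + j + 1 := by
        rw [show ((j : Int) + 1) = ((j + 1 : Nat) : Int) by push_cast; ring]
        rw [pyGetD_seg _ _ _ (by positivity) (by omega)]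
        push_cast; ring
      have hnotmem : ((b + (j : Int), b + (j : Int) + 1)) ∉ es0 ++ pathE b j := by
        intro hmem
        rcases List.mem_append.mp hmem with h | h
        · have := hinv _ h; dsimp at this; omega
        · have := (fst_lt_of_mem_pathE _ _ _ h).1; dsimp at this; omega
      simp only [aEdgeStep, hmod, hu, hv]
      rw [min_eq_left (by omega), max_eq_right (by omega)]
      rw [if_neg hnotmem, pathE_succ, ← List.append_assoc]
    rw [hstep]
    have h2 := ih (j + 1) (by omega)
    rw [show ((j + 1 : Nat) : Int) = (j : Int) + 1 by push_cast; ring] at h2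
    rw [show (j : Int) + ((k + 1 : Nat) : Int) = (j : Int) + 1 + (k : Int) by push_cast; ring]
    rw [h2, show j + 1 + k = j + (k + 1) by omega]

-- A's edge loop, full: the path phase then the closing edge
lemma edgeLoop (m : Nat) (hm : 2 ≤ m) (b : Int) (es0 : List (Int × Int))
    (hinv : ∀ e ∈ es0, e.2 ≤ b) :
    (PySem.List.pyRange 0 ((m : Int) + 1) 1).foldl
      (aEdgeStep ((m : Int) + 1) (seg b (m + 1))) es0
      = es0 ++ cycE b m := by
  have hsplit : PySem.List.pyRange 0 ((m : Int) + 1) 1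
      = PySem.List.pyRange 0 (m : Int) 1 ++ [(m : Int)] := by
    rw [PySem.List.pyRange_one_succ_right (by positivity)]
  rw [hsplit, List.foldl_append]
  have h1 := phase1 m hm b es0 hinv m 0 (by omega)
  have hp0 : pathE b 0 = [] := rfl
  rw [hp0, List.append_nil] at h1
  simp only [Nat.cast_zero, zero_add] at h1
  rw [h1]
  simp only [List.foldl_cons, List.foldl_nil]
  have hmod : PySem.Int.mod ((m : Int) + 1) ((m : Int) + 1) = 0 := by
    rw [PySem.Int.mod_eq_emod_of_pos (by positivity)]
    simp
  have hu : PySem.List.pyGetD (seg b (m + 1)) (m : Int) 0 = b + m :=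
    pyGetD_seg _ _ _ (by positivity) (by omega)
  have hv : PySem.List.pyGetD (seg b (m + 1)) 0 0 = b := by
    have := pyGetD_seg b (m + 1) 0 le_rfl (by omega)
    simpa using this
  have hnotmem : ((b, b + (m : Int))) ∉ es0 ++ pathE b m := by
    intro hmem
    rcases List.mem_append.mp hmem with h | h
    · have := hinv _ h; dsimp at this; omega
    · obtain ⟨h1, h2, h3⟩ := fst_lt_of_mem_pathE _ _ _ h
      dsimp at h1 h2 h3
      omega
  simp only [aEdgeStep, hmod, hu, hv]
  rw [min_eq_right (by omega), max_eq_left (by omega)]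
  rw [if_neg hnotmem]
  simp [cycE]

-- A's outer loop invariant: state after k cycles
lemma outerA (m : Nat) (hm : 2 ≤ m) (l : List Int) :
    ∀ (k : Nat),
    l.foldl (aCycleStep ((m : Int) + 1))
      (seg 0 (1 + k * m), allE m k, 1 + (k : Int) * m, (k : Int) * m)
      = (seg 0 (1 + (k + l.length) * m), allE m (k + l.length),
         1 + ((k : Int) + l.length) * m, ((k : Int) + l.length) * m) := by
  induction l with
  | nil => intro k; simp
  | cons x xs ih =>
    intro k
    rw [List.foldl_cons]
    have hstep : aCycleStep ((m : Int) + 1)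
        (seg 0 (1 + k * m), allE m k, 1 + (k : Int) * m, (k : Int) * m) x
        = (seg 0 (1 + (k + 1) * m), allE m (k + 1),
           1 + ((k + 1 : Nat) : Int) * m, ((k + 1 : Nat) : Int) * m) := by
      simp only [aCycleStep, add_sub_cancel_right]
      have hlen : (PySem.List.pyRange 0 (m : Int) 1).length = m := by
        rw [PySem.List.length_pyRange_one]; omega
      have hinner := innerA (PySem.List.pyRange 0 (m : Int) 1)
        (seg 0 (1 + k * m)) [(k : Int) * m] (1 + (k : Int) * m)
      rw [hlen] at hinner
      rw [hinner]
      have hcn : [(k : Int) * m] ++ seg (1 + (k : Int) * m) m = seg ((k : Int) * m) (m + 1) := by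
        have h1 : [(k : Int) * m] = seg ((k : Int) * m) 1 := by simp [seg, List.range_one]
        have h2 := seg_append ((k : Int) * m) 1 m
        rw [show ((k : Int) * m + ((1 : Nat) : Int)) = 1 + (k : Int) * m by push_cast; ring] at h2
        rw [show (1 : Nat) + m = m + 1 by omega] at h2
        rw [h1, h2]
      have hverts : seg 0 (1 + k * m) ++ seg (1 + (k : Int) * m) m = seg 0 (1 + (k + 1) * m) := by
        have h3 := seg_append 0 (1 + k * m) m
        rw [show ((0 : Int) + ((1 + k * m : Nat) : Int)) = 1 + (k : Int) * m by push_cast; ring] at h3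
        rw [h3]
        congr 1
        ring
      dsimp only
      rw [hcn]
      have hedges := edgeLoop m hm ((k : Int) * m) (allE m k)
        (fun e he => snd_le_of_mem_allE m k e he)
      rw [hedges]
      have hlast : PySem.List.pyGetD (seg ((k : Int) * m) (m + 1)) (-1) 0 = (k : Int) * m + m := by
        rw [seg_succ, PySem.List.pyGetD_neg_one_append_singleton]
      rw [hverts, hlast]
      refine Prod.ext rfl (Prod.ext rfl (Prod.ext ?_ ?_))
      · dsimp; ring
      · dsimp; ring
    rw [hstep, ih (k + 1)]
    simp only [List.length_cons]
    have e1 : k + 1 + xs.length = k + (xs.length + 1) := by omega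
    have e2 : ((k + 1 : Nat) : Int) + (xs.length : Int)
        = (k : Int) + ((xs.length + 1 : Nat) : Int) := by push_cast; ring
    rw [e1, e2]

-- B's edge build
lemma outerB (m : Nat) :
    ∀ (n : Nat),
    (PySem.List.pyRange 0 (n : Int) 1).foldl (bCycleStep ((m : Int) + 1)) []
      = allE m n := by
  intro n
  induction n with
  | zero => simp [allE, PySem.List.pyRange_one_eq_nil]
  | succ n ih =>
    have hsplit : PySem.List.pyRange 0 ((n + 1 : Nat) : Int) 1
        = PySem.List.pyRange 0 (n : Int) 1 ++ [(n : Int)] := by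
      push_cast
      rw [PySem.List.pyRange_one_succ_right (by positivity)]
    rw [hsplit, List.foldl_append, ih]
    simp only [List.foldl_cons, List.foldl_nil, bCycleStep, add_sub_cancel_right]
    have hfold : (PySem.List.pyRange 0 ((m : Int)) 1).foldl
        (fun es i => es ++ [((n : Int) * m + i, (n : Int) * m + i + 1)]) (allE m n)
        = allE m n ++ pathE ((n : Int) * m) m := by
      rw [PySem.List.foldl_append_singleton_eq_map]
      congr 1
      rw [PySem.List.pyRange_one]
      simp only [sub_zero, Int.toNat_natCast, List.map_map, pathE]
      apply List.map_congr_left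
      intro a _
      simp
    rw [hfold]
    show allE m n ++ pathE ((n : Int) * m) m ++ [((n : Int) * m, (n : Int) * m + (m : Int) + 1 - 1)]
      = allE m (n + 1)
    rw [show (n : Int) * m + (m : Int) + 1 - 1 = (n : Int) * m + m by ring]
    rw [List.append_assoc]
    rfl

-- ===== VERDICT (by name: the statement is the Claim_ definition above) =====
theorem chained_cycles_graph_spec : Claim_equal_chained_cycles_graph := by
  intro cs nc _hdom hpre
  obtain ⟨hc3, _hodd, hn1⟩ := hpre
  unfold Spec_chained_cycles_graph
  obtain ⟨m, rfl⟩ : ∃ m : Nat, cs = (m : Int) + 1 := ⟨(cs - 1).toNat, by omega⟩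
  obtain ⟨n, rfl⟩ : ∃ n : Nat, nc = (n : Int) := ⟨nc.toNat, by omega⟩
  have hm : 2 ≤ m := by omega
  have hlen : (PySem.List.pyRange 0 (n : Int) 1).length = n := by
    rw [PySem.List.length_pyRange_one]; omega
  have hA := outerA m hm (PySem.List.pyRange 0 (n : Int) 1) 0
  rw [hlen] at hA
  simp only [Nat.cast_zero, zero_mul, zero_add, add_zero] at hA
  have hinit : seg 0 (1 + 0 * m) = [0] := by simp [seg, List.range_one]
  rw [show 1 + 0 * m = 1 by omega] at hinit
  have hA0 : allE m 0 = ([] : List (Int × Int)) := rfl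
  unfold chained_cycles_graph chained_cycles_graph_alt
  dsimp only
  rw [outerB m n]
  rw [← hinit, ← hA0, hA]
  refine Prod.ext ?_ rfl
  show seg 0 (1 + n * m) = PySem.List.pyRange 0 (1 + (n : Int) * (((m : Int) + 1) - 1)) 1
  rw [PySem.List.pyRange_one]
  simp only [sub_zero, add_sub_cancel_right]
  rw [show ((1 : Int) + (n : Int) * (m : Int)).toNat = 1 + n * m by
    rw [show (1 : Int) + (n : Int) * (m : Int) = ((1 + n * m : Nat) : Int) by push_cast; ring]
    exact Int.toNat_natCast _]
  rfl
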